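-- pv_equiv track=rewrite | github.com/dinleo/CodeTest | PyCode/Programmers_Test/level_3/_불량이용자.py | solution
-- ===== SOURCE A (Python) =====
-- from collections import defaultdict
--
-- def solution(user_id, banned_id):
--     d = defaultdict(list)
--     for i in range(len(banned_id)):
--         b = banned_id[i]
--         for u in user_id:
--             catch = True
--             if len(b) != len(u):
--                 continue
--             ln = len(b)
--             for j in range(ln):
--                 if b[j] != "*":
--                     if b[j] != u[j]:
--                         catch = False
--                         break
--             if catch:
--                 d[i].append(u)
--
--     answer = 0
--     return d
-- ===== SOURCE B (Python) =====
-- from collections import defaultdict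
--
--
-- def solution(user_id, banned_id):
--     # Index users by length once, so each pattern only scans same-length users.
--     by_len = defaultdict(list)
--     for u in user_id:
--         by_len[len(u)].append(u)
--     d = defaultdict(list)
--     for i, b in enumerate(banned_id):
--         matches = [u for u in by_len[len(b)]
--                    if all(bc == '*' or bc == uc for bc, uc in zip(b, u))]
--         if matches:
--             d[i] = matches
--     return d
-- ===== Notes on version B (the rewrite author's own statement) =====
-- stated objective: alternative
-- what changed: B first builds a length-keyed index of user ids, then for each enumerated pattern filters only the same-length bucket with a zip/all wildcard test and inserts the whole match list at once, instead of A's per-index triple nested loop with a catch flag and per-user dict appends.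
import Mathlib
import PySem

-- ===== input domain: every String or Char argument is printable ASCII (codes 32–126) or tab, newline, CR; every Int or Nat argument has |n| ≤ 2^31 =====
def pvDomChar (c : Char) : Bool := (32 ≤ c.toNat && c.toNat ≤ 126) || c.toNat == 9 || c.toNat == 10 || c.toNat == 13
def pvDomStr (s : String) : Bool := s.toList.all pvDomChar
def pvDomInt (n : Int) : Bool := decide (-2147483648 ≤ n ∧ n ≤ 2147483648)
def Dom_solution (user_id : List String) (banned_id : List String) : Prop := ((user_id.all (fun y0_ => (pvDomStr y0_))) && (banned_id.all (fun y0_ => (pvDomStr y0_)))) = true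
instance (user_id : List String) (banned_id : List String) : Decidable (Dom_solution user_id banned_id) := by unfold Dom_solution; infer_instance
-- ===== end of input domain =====

-- B replaces A's index-driven triple loop (catch flag, per-user dict appends) by a length-keyed
-- index of the users plus a zip/all wildcard filter with one batch insertion per pattern
-- (alternative structure, same return value).

-- ===== PORT A =====
-- A's inner j-loop (catch flag + break) over two equal-length strings, as paired structural
-- recursion over their character lists; exact because it is only called when len b = len u.
def solutionCheck : List Char → List Char → Bool
  | bc :: bs, uc :: us =>
      if bc ≠ '*' then
        if bc ≠ uc then false else solutionCheck bs us
      else solutionCheck bs us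
  | _, _ => true

def solution (user_id : List String) (banned_id : List String) : List (Int × List String) :=
  let d : PySem.Dict Int (List String) :=
    (PySem.List.pyRange 0 (PySem.List.len banned_id)).foldl
      (fun d i =>
        let b := PySem.List.pyGetD banned_id i ""   -- banned_id[i]; i always in range
        user_id.foldl
          (fun d u =>
            if PySem.Str.len b ≠ PySem.Str.len u then d
            else if solutionCheck b.toList u.toList then d.modify i [] (· ++ [u]) else d)
          d)
      PySem.Dict.empty
  d.items

-- ===== PORT B =====
def solutionMatches (by_len : PySem.Dict Int (List String)) (b : String) : List String :=
  (by_len.getD (PySem.Str.len b) []).filter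
    (fun u => (b.toList.zip u.toList).all (fun p => p.1 == '*' || p.1 == p.2))

def solution_alt (user_id : List String) (banned_id : List String) : List (Int × List String) :=
  let by_len : PySem.Dict Int (List String) :=
    user_id.foldl (fun d u => d.modify (PySem.Str.len u) [] (· ++ [u])) PySem.Dict.empty
  let d : PySem.Dict Int (List String) :=
    (PySem.List.enumerate banned_id 0).foldl
      (fun d p =>
        let m := solutionMatches by_len p.2
        if m ≠ [] then d.insert p.1 m else d)
      PySem.Dict.empty
  d.items

-- ===== PRECONDITION & SPEC =====
def Spec_solution (user_id : List String) (banned_id : List String) (out : List (Int × List String)) : Prop := out = solution_alt user_id banned_id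
instance (user_id : List String) (banned_id : List String) (out : List (Int × List String)) : Decidable (Spec_solution user_id banned_id out) := by unfold Spec_solution; infer_instance

-- ===== CLAIM (what is proved, stated in full; the proofs are below) =====
def Claim_equal_solution : Prop := ∀ (user_id : List String) (banned_id : List String), Dom_solution user_id banned_id → Spec_solution user_id banned_id (solution user_id banned_id)

-- ===== LEMMAS AND PROOFS =====

-- the combined match predicate both programs decide for a pattern b and a user u
def pvP (b u : String) : Bool :=
  (b.toList.zip u.toList).all (fun p => p.1 == '*' || p.1 == p.2)
    && (PySem.Str.len u == PySem.Str.len b)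

-- the users matching pattern b, in user_id order
def pvM (user_id : List String) (b : String) : List String := user_id.filter (pvP b)

-- the common shape of one outer-loop step, acting directly on the items list
def pvCommon (user_id : List String) (acc : List (Int × List String)) (p : Int × String) :
    List (Int × List String) :=
  if pvM user_id p.2 = [] then acc else acc ++ [(p.1, pvM user_id p.2)]

theorem solutionCheck_eq_zip_all (bs us : List Char) :
    solutionCheck bs us = (bs.zip us).all (fun p => p.1 == '*' || p.1 == p.2) := by
  induction bs generalizing us with
  | nil => cases us <;> simp [solutionCheck]
  | cons bc bs ih =>
    cases us with
    | nil => simp [solutionCheck]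
    | cons uc us =>
      simp only [solutionCheck, List.zip_cons_cons, List.all_cons, ih]
      by_cases h1 : bc = '*' <;> by_cases h2 : bc = uc <;> simp [h1, h2]

theorem byLen_getD (user_id : List String) (L : Int) :
    (user_id.foldl (fun d u => d.modify (PySem.Str.len u) [] (· ++ [u]))
        PySem.Dict.empty).getD L []
      = user_id.filter (fun u => PySem.Str.len u == L) := by
  have h : user_id.foldl (fun d u => d.modify (PySem.Str.len u) [] (· ++ [u])) PySem.Dict.empty
      = (user_id.map (fun u => (PySem.Str.len u, u))).foldl
          (fun d p => d.modify p.1 [] (· ++ [p.2])) PySem.Dict.empty := by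
    rw [List.foldl_map]
  rw [h, PySem.Dict.getD_foldl_modify_append, PySem.Dict.getD_empty]
  simp [List.filter_map, Function.comp_def]

theorem matches_eq (user_id : List String) (b : String) :
    solutionMatches
        (user_id.foldl (fun d u => d.modify (PySem.Str.len u) [] (· ++ [u])) PySem.Dict.empty) b
      = pvM user_id b := by
  rw [solutionMatches, byLen_getD, List.filter_filter]
  rfl

theorem modfold_present (l : List String) (i : Int) (d : PySem.Dict Int (List String))
    (v : List String) (hv : d.get? i = some v) (hnd : d.keys.Nodup) :
    (l.foldl (fun d u => d.modify i [] (· ++ [u])) d).items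
      = d.items.map (fun p => if p.1 = i then (i, v ++ l) else p) := by
  induction l generalizing d v with
  | nil =>
    simp only [List.foldl_nil, List.append_nil]
    rw [List.map_congr_left (g := id), List.map_id]
    intro p hp
    by_cases h : p.1 = i
    · have : (p.1, p.2) ∈ d.items := by simpa using hp
      rw [h] at this
      have := PySem.Dict.get?_of_mem_items _ this hnd
      rw [hv] at this
      simp only [Option.some.injEq] at this
      rw [if_pos h]
      exact Prod.ext_iff.mpr ⟨h.symm, this⟩
    · simp [h]
  | cons a l ih =>
    simp only [List.foldl_cons]
    have hgetD : d.getD i [] = v := PySem.Dict.getD_of_get?_eq_some _ _ hv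
    have hmod : d.modify i [] (· ++ [a]) = d.insert i (v ++ [a]) := by
      simp [PySem.Dict.modify, hgetD]
    rw [hmod]
    have hcon : d.contains i = true := by
      rw [PySem.Dict.contains_eq_isSome_get?, hv]; rfl
    rw [ih (d.insert i (v ++ [a])) (v ++ [a]) (PySem.Dict.get?_insert_self _ _ _)
      (PySem.Dict.nodup_keys_insert _ _ _ hnd)]
    rw [PySem.Dict.items_insert_of_contains _ _ hcon, List.map_map]
    apply List.map_congr_left
    intro p hp
    by_cases h : p.1 = i <;> simp [h, Function.comp]

theorem modfold_fresh (l : List String) (i : Int) (d : PySem.Dict Int (List String))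
    (hc : d.contains i = false) (hnd : d.keys.Nodup) :
    (l.foldl (fun d u => d.modify i [] (· ++ [u])) d).items
      = if l = [] then d.items else d.items ++ [(i, l)] := by
  have hkey : ∀ p ∈ d.items, p.1 ≠ i := by
    intro p hp h
    have : i ∈ d.keys := by
      simp only [PySem.Dict.keys]
      exact List.mem_map.mpr ⟨p, hp, h⟩
    rw [PySem.Dict.contains_eq_decide_mem_keys] at hc
    simp [this] at hc
  cases l with
  | nil => simp
  | cons a l =>
    simp only [List.foldl_cons, reduceCtorEq, if_false]
    have hmod : d.modify i [] (· ++ [a]) = d.insert i [a] := by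
      simp [PySem.Dict.modify, PySem.Dict.getD_of_not_contains _ _ hc]
    rw [hmod]
    rw [modfold_present l i _ [a] (PySem.Dict.get?_insert_self _ _ _)
      (PySem.Dict.nodup_keys_insert _ _ _ hnd)]
    rw [PySem.Dict.items_insert_of_not_contains _ _ hc, List.map_append]
    congr 1
    · rw [List.map_congr_left (g := id), List.map_id]
      intro p hp
      simp [hkey p hp]
    · simp

theorem commonFold_fst_sublist (user_id : List String) (e : List (Int × String)) :
    ∀ acc : List (Int × List String),
      ((e.foldl (pvCommon user_id) acc).map (·.1)).Sublist
        (acc.map (·.1) ++ e.map (·.1)) := by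
  induction e with
  | nil => simp
  | cons p e ih =>
    intro acc
    simp only [List.foldl_cons, List.map_cons]
    have h2 : (acc.map (·.1) ++ p.1 :: e.map (·.1))
        = (pvCommon user_id acc p).map (·.1) ++ e.map (·.1)
        ∨ ((pvCommon user_id acc p).map (·.1) ++ e.map (·.1)).Sublist
            (acc.map (·.1) ++ p.1 :: e.map (·.1)) := by
      by_cases h : pvM user_id p.2 = []
      · right
        simp only [pvCommon, if_pos h]
        exact List.Sublist.append (List.Sublist.refl _) (List.sublist_cons_self _ _)
      · left
        simp [pvCommon, if_neg h, List.append_assoc]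
    rcases h2 with h2 | h2
    · rw [h2]; exact ih _
    · exact (ih _).trans h2

theorem specKeys_sublist (user_id : List String) (bid : List String) :
    (((PySem.List.enumerate bid 0).foldl (pvCommon user_id) []).map (·.1)).Sublist
      (PySem.List.pyRange 0 bid.length) := by
  have := commonFold_fst_sublist user_id (PySem.List.enumerate bid 0) []
  simpa [PySem.List.map_fst_enumerate] using this

theorem A_inner (user_id : List String) (b : String) (i : Int)
    (d : PySem.Dict Int (List String)) :
    user_id.foldl
        (fun d u =>
          if PySem.Str.len b ≠ PySem.Str.len u then d
          else if solutionCheck b.toList u.toList then d.modify i [] (· ++ [u]) else d)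
        d
      = (pvM user_id b).foldl (fun d u => d.modify i [] (· ++ [u])) d := by
  rw [pvM, List.foldl_filter]
  apply PySem.List.foldl_congr_mem
  intro acc u _
  simp only [PySem.Str.len_eq, ne_eq, Nat.cast_inj, pvP, solutionCheck_eq_zip_all,
    Bool.and_eq_true, beq_iff_eq]
  by_cases h1 : u.length = b.length
  · by_cases h2 : ((b.toList.zip u.toList).all fun p => p.1 == '*' || p.1 == p.2) = true
    · simp [h1, h2]
    · simp [h1, h2]
  · simp [h1, Ne.symm h1]

theorem A_aux (user_id : List String) (bid : List String) :
    ((PySem.List.pyRange 0 (PySem.List.len bid)).foldl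
        (fun d i =>
          (pvM user_id (PySem.List.pyGetD bid i "")).foldl
            (fun d u => d.modify i [] (· ++ [u])) d)
        PySem.Dict.empty).items
      = (PySem.List.enumerate bid 0).foldl (pvCommon user_id) [] := by
  induction bid using List.reverseRecOn with
  | nil => simp [PySem.List.enumerate_nil, PySem.Dict.empty, PySem.List.pyRange]
  | append_singleton xs x ih =>
    have hlen : PySem.List.len (xs ++ [x]) = (xs.length : Int) + 1 := by
      simp [PySem.List.len_eq]
    rw [hlen, PySem.List.pyRange_one_succ_right (Int.natCast_nonneg _), List.foldl_append,
      PySem.List.enumerate_append, List.foldl_append]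
    simp only [List.foldl_cons, List.foldl_nil, PySem.List.enumerate_cons,
      PySem.List.enumerate_nil]
    -- prefix fold reads (xs ++ [x])[i] = xs[i] for i < len xs
    have hcongr : (PySem.List.pyRange 0 (xs.length : Int)).foldl
        (fun d i =>
          (pvM user_id (PySem.List.pyGetD (xs ++ [x]) i "")).foldl
            (fun d u => d.modify i [] (· ++ [u])) d)
        PySem.Dict.empty
      = (PySem.List.pyRange 0 (PySem.List.len xs)).foldl
        (fun d i =>
          (pvM user_id (PySem.List.pyGetD xs i "")).foldl
            (fun d u => d.modify i [] (· ++ [u])) d)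
        PySem.Dict.empty := by
      rw [show PySem.List.len xs = (xs.length : Int) by simp [PySem.List.len_eq]]
      apply PySem.List.foldl_congr_mem
      intro acc i hi
      rw [PySem.List.mem_pyRange_one] at hi
      have hi2 : i.toNat < xs.length := by omega
      rw [PySem.List.pyGetD_eq_getElem _ _ hi.1 (by simp; omega),
        PySem.List.pyGetD_eq_getElem _ _ hi.1 (by exact_mod_cast hi.2),
        List.getElem_append_left hi2]
    rw [hcongr]
    have hget : PySem.List.pyGetD (xs ++ [x]) (xs.length : Int) "" = x := by
      rw [PySem.List.pyGetD_eq_getElem _ _ (Int.natCast_nonneg _) (by simp)]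
      simp
    rw [hget]
    set dprev := (PySem.List.pyRange 0 (PySem.List.len xs)).foldl
        (fun d i =>
          (pvM user_id (PySem.List.pyGetD xs i "")).foldl
            (fun d u => d.modify i [] (· ++ [u])) d)
        PySem.Dict.empty with hdprev
    have hkeys : dprev.keys = ((PySem.List.enumerate xs 0).foldl (pvCommon user_id) []).map (·.1) := by
      simp only [PySem.Dict.keys]
      rw [ih]
    have hnd : dprev.keys.Nodup := by
      rw [hkeys]
      exact (specKeys_sublist user_id xs).nodup (PySem.List.nodup_pyRange_one _ _)
    have hfresh : dprev.contains ((xs.length : Int)) = false := by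
      rw [PySem.Dict.contains_eq_decide_mem_keys, hkeys]
      simp only [decide_eq_false_iff_not]
      intro hmem
      have := (specKeys_sublist user_id xs).subset hmem
      rw [PySem.List.mem_pyRange_one] at this
      omega
    rw [modfold_fresh _ _ _ hfresh hnd, ih]
    by_cases h : pvM user_id x = []
    · simp [pvCommon, h]
    · simp [pvCommon, h]

theorem A_items (user_id : List String) (bid : List String) :
    ((PySem.List.pyRange 0 (PySem.List.len bid)).foldl
        (fun d i =>
          let b := PySem.List.pyGetD bid i ""
          user_id.foldl
            (fun d u =>
              if PySem.Str.len b ≠ PySem.Str.len u then d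
              else if solutionCheck b.toList u.toList then d.modify i [] (· ++ [u]) else d)
            d)
        PySem.Dict.empty).items
      = (PySem.List.enumerate bid 0).foldl (pvCommon user_id) [] := by
  have hstep : (fun (d : PySem.Dict Int (List String)) (i : Int) =>
        let b := PySem.List.pyGetD bid i ""
        user_id.foldl
          (fun d u =>
            if PySem.Str.len b ≠ PySem.Str.len u then d
            else if solutionCheck b.toList u.toList then d.modify i [] (· ++ [u]) else d)
          d)
      = (fun d i =>
          (pvM user_id (PySem.List.pyGetD bid i "")).foldl
            (fun d u => d.modify i [] (· ++ [u])) d) := by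
    funext d i
    exact A_inner user_id _ i d
  rw [hstep, A_aux]

theorem B_aux (user_id : List String) (bid : List String) :
    ((PySem.List.enumerate bid 0).foldl
        (fun d p => if pvM user_id p.2 = [] then d
                    else d.insert p.1 (pvM user_id p.2))
        PySem.Dict.empty).items
      = (PySem.List.enumerate bid 0).foldl (pvCommon user_id) [] := by
  induction bid using List.reverseRecOn with
  | nil => simp [PySem.List.enumerate_nil, PySem.Dict.empty]
  | append_singleton xs x ih =>
    rw [PySem.List.enumerate_append, List.foldl_append, List.foldl_append]
    simp only [PySem.List.enumerate_cons, PySem.List.enumerate_nil, List.foldl_cons,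
      List.foldl_nil]
    have hfresh : ((PySem.List.enumerate xs 0).foldl
        (fun d p => if pvM user_id p.2 = [] then d
                    else d.insert p.1 (pvM user_id p.2))
        PySem.Dict.empty).contains ((0 : Int) + xs.length) = false := by
      rw [PySem.Dict.contains_eq_decide_mem_keys]
      simp only [decide_eq_false_iff_not, PySem.Dict.keys]
      intro hmem
      rw [ih] at hmem
      have := (specKeys_sublist user_id xs).subset hmem
      rw [PySem.List.mem_pyRange_one] at this
      omega
    by_cases h : pvM user_id x = []
    · rw [if_pos h, ih]
      simp [pvCommon, h]
    · rw [if_neg h, PySem.Dict.items_insert_of_not_contains _ _ hfresh, ih]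
      simp [pvCommon, h]

theorem B_items (user_id : List String) (bid : List String) :
    ((PySem.List.enumerate bid 0).foldl
        (fun d p =>
          let m := solutionMatches
            (user_id.foldl (fun d u => d.modify (PySem.Str.len u) [] (· ++ [u]))
              PySem.Dict.empty) p.2
          if m ≠ [] then d.insert p.1 m else d)
        PySem.Dict.empty).items
      = (PySem.List.enumerate bid 0).foldl (pvCommon user_id) [] := by
  have hstep : (fun (d : PySem.Dict Int (List String)) (p : Int × String) =>
        let m := solutionMatches
          (user_id.foldl (fun d u => d.modify (PySem.Str.len u) [] (· ++ [u]))
            PySem.Dict.empty) p.2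
        if m ≠ [] then d.insert p.1 m else d)
      = (fun d p => if pvM user_id p.2 = [] then d else d.insert p.1 (pvM user_id p.2)) := by
    funext d p
    simp only [matches_eq]
    by_cases h : pvM user_id p.2 = [] <;> simp [h]
  rw [hstep, B_aux]

-- ===== VERDICT (by name: the statement is the Claim_ definition above) =====
theorem solution_spec : Claim_equal_solution := by
  intro user_id banned_id _
  show solution user_id banned_id = solution_alt user_id banned_id
  simp only [solution, solution_alt]
  rw [A_items, B_items]
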